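-- pv_equiv track=rewrite | github.com/jace-xu/Gomoku-game | logic/move_logic.py | _find_segments
-- ===== SOURCE A (Python) =====
-- def _find_segments(pattern, player):
--     segments = []
--     start = -1
--     for idx, p in enumerate(pattern):
--         if p == player:
--             if start == -1:
--                 start = idx
--         else:
--             if start != -1:
--                 end = idx - 1
--                 left_open = (start == 0) or (pattern[start - 1] != player)
--                 right_open = (end == len(pattern) - 1) or (pattern[end + 1] != player)
--                 segments.append((end - start + 1, left_open, right_open))
--                 start = -1
--     if start != -1:
--         end = len(pattern) - 1
--         left_open = (start == 0) or (pattern[start - 1] != player)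
--         right_open = (end == len(pattern) - 1) or (pattern[end + 1] != player)
--         segments.append((end - start + 1, left_open, right_open))
--     return segments
-- ===== SOURCE B (Python) =====
-- def _find_segments(pattern, player):
--     n = len(pattern)
--     starts = [i for i in range(n)
--               if pattern[i] == player and (i == 0 or pattern[i - 1] != player)]
--     ends = [i for i in range(n)
--             if pattern[i] == player and (i == n - 1 or pattern[i + 1] != player)]
--     return [(e - s + 1,
--              s == 0 or pattern[s - 1] != player,
--              e == n - 1 or pattern[e + 1] != player)
--             for s, e in zip(starts, ends)]
-- ===== Notes on version B (the rewrite author's own statement) =====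
-- stated objective: alternative
-- what changed: Replaces A's single-pass -1-sentinel state machine (with its duplicated post-loop close) by three staged passes: a filter collecting all run-start indices, a filter collecting all run-end indices, and a zip/map that pairs them into (length, left_open, right_open) segments.
import Mathlib
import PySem

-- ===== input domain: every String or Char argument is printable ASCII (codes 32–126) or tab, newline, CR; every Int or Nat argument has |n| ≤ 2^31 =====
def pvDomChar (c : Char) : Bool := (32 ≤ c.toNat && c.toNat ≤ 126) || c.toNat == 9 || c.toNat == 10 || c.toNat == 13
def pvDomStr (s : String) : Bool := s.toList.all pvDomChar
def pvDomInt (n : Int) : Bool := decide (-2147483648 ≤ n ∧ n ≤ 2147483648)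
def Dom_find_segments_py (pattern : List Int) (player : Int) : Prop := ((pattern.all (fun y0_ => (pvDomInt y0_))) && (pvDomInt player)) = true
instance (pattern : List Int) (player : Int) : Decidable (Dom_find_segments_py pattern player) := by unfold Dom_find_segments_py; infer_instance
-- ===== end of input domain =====

-- B replaces A's single-pass -1-sentinel state machine (with its duplicated post-loop close)
-- by three staged passes: filter out all run-start indices, filter out all run-end indices,
-- zip them and map to segments (objective: alternative, same O(n) cost).

-- ===== PORT A =====
-- A's for-loop over enumerate(pattern) as structural recursion over the enumerated list,
-- carrying the same state (segments, start); the trailing `if start != -1` block is the [] case.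
-- pattern[start-1] / pattern[end+1] are reached only behind the short-circuiting `or`, where
-- they are in range, so `pyGet? ≠ some player` is exactly Python's `pattern[..] != player` there.
def aGo (pattern : List Int) (player : Int) :
    List (Int × Int) → List (Int × Bool × Bool) → Int → List (Int × Bool × Bool)
  | [], segments, start =>
      if start ≠ -1 then
        segments ++ [(((pattern.length : Int) - 1) - start + 1,
          decide (start = 0) || decide (PySem.List.pyGet? pattern (start - 1) ≠ some player),
          decide ((pattern.length : Int) - 1 = (pattern.length : Int) - 1) ||
            decide (PySem.List.pyGet? pattern (((pattern.length : Int) - 1) + 1) ≠ some player))]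
      else segments
  | (idx, p) :: rest, segments, start =>
      if p = player then
        if start = -1 then aGo pattern player rest segments idx
        else aGo pattern player rest segments start
      else
        if start ≠ -1 then
          aGo pattern player rest
            (segments ++ [((idx - 1) - start + 1,
              decide (start = 0) || decide (PySem.List.pyGet? pattern (start - 1) ≠ some player),
              decide (idx - 1 = (pattern.length : Int) - 1) ||
                decide (PySem.List.pyGet? pattern ((idx - 1) + 1) ≠ some player))])
            (-1)
        else aGo pattern player rest segments start

def find_segments_py (pattern : List Int) (player : Int) : List (Int × Bool × Bool) :=
  aGo pattern player (PySem.List.enumerate pattern 0) [] (-1)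

-- ===== PORT B =====
-- the filter condition of B's `starts` comprehension (short-circuit: pattern[i-1] only read when i ≠ 0)
def bCondS (pattern : List Int) (player : Int) (i : Int) : Bool :=
  decide (PySem.List.pyGet? pattern i = some player) &&
  (decide (i = 0) || decide (PySem.List.pyGet? pattern (i - 1) ≠ some player))

-- the filter condition of B's `ends` comprehension
def bCondE (pattern : List Int) (player : Int) (i : Int) : Bool :=
  decide (PySem.List.pyGet? pattern i = some player) &&
  (decide (i = (pattern.length : Int) - 1) || decide (PySem.List.pyGet? pattern (i + 1) ≠ some player))

-- the body of B's final zip comprehension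
def bSeg (pattern : List Int) (player : Int) (se : Int × Int) : Int × Bool × Bool :=
  (se.2 - se.1 + 1,
   decide (se.1 = 0) || decide (PySem.List.pyGet? pattern (se.1 - 1) ≠ some player),
   decide (se.2 = (pattern.length : Int) - 1) || decide (PySem.List.pyGet? pattern (se.2 + 1) ≠ some player))

def find_segments_py_alt (pattern : List Int) (player : Int) : List (Int × Bool × Bool) :=
  (((PySem.List.pyRange 0 (pattern.length : Int) 1).filter (bCondS pattern player)).zip
   ((PySem.List.pyRange 0 (pattern.length : Int) 1).filter (bCondE pattern player))).map
    (bSeg pattern player)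

-- ===== PRECONDITION & SPEC =====
def Spec_find_segments_py (pattern : List Int) (player : Int) (out : List (Int × Bool × Bool)) : Prop := out = find_segments_py_alt pattern player
instance (pattern : List Int) (player : Int) (out : List (Int × Bool × Bool)) : Decidable (Spec_find_segments_py pattern player out) := by unfold Spec_find_segments_py; infer_instance

-- ===== CLAIM (what is proved, stated in full; the proofs are below) =====
def Claim_equal_find_segments_py : Prop := ∀ (pattern : List Int) (player : Int), Dom_find_segments_py pattern player → Spec_find_segments_py pattern player (find_segments_py pattern player)

-- ===== LEMMAS AND PROOFS =====

-- reading pattern at offset t into its suffix s = pattern.drop i.toNat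
lemma pyGet_drop (pattern s : List Int) (i : Int) (hi : 0 ≤ i)
    (hdrop : pattern.drop i.toNat = s) (t : Nat) :
    PySem.List.pyGet? pattern (i + (t : Int)) = s[t]? := by
  have h1 : (i + (t : Int)) = ((i.toNat + t : Nat) : Int) := by omega
  rw [h1, PySem.List.pyGet?_natCast, ← List.getElem?_drop, hdrop]

-- a filter over a range all of whose elements fail the condition is empty
lemma filter_pyRange_nil (cond : Int → Bool) (a b : Int)
    (h : ∀ x : Int, a ≤ x → x < b → cond x = false) :
    (PySem.List.pyRange a b 1).filter cond = [] := by
  rw [List.filter_eq_nil_iff]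
  intro x hx
  rw [PySem.List.mem_pyRange_one] at hx
  simp [h x hx.1 hx.2]

-- A's loop keeps state (segments, start) unchanged across a run of player stones
lemma aGo_run (pattern : List Int) (player : Int) :
    ∀ (l : List Int), (∀ y ∈ l, y = player) →
    ∀ (j i : Int), 0 ≤ i →
    ∀ (r : List (Int × Int)) (segs : List (Int × Bool × Bool)),
      aGo pattern player (PySem.List.enumerate l j ++ r) segs i
        = aGo pattern player r segs i := by
  intro l
  induction l with
  | nil => intro _ j i _ r segs; simp [PySem.List.enumerate_nil]
  | cons x xs ih =>
    intro h j i hi r segs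
    rw [PySem.List.enumerate_cons]
    have hx : x = player := h x (by simp)
    have hne : ¬ (i = -1) := by omega
    simp only [List.cons_append, aGo, if_pos hx, if_neg hne]
    exact ih (fun y hy => h y (by simp [hy])) (j + 1) i hi r segs

-- first element of a dropWhile fails the predicate
lemma dropWhile_cons_head {p : Int → Bool} :
    ∀ (l : List Int) (y : Int) (t : List Int), l.dropWhile p = y :: t → p y = false := by
  intro l
  induction l with
  | nil => intro y t h; simp at h
  | cons a as ih =>
    intro y t h
    by_cases hp : p a
    · rw [List.dropWhile_cons_of_pos hp] at h; exact ih y t h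
    · rw [List.dropWhile_cons_of_neg hp] at h
      cases h; simpa using hp

-- main invariant: at a fresh position i (not inside a player run), A's remaining loop
-- produces exactly B's zipped start/end segments of the remaining range
lemma aGo_main (pattern : List Int) (player : Int) :
    ∀ (fuel : Nat) (s : List Int), s.length ≤ fuel →
    ∀ (i : Int), 0 ≤ i → pattern.drop i.toNat = s →
    (i = 0 ∨ PySem.List.pyGet? pattern (i - 1) ≠ some player) →
    ∀ segs,
      aGo pattern player (PySem.List.enumerate s i) segs (-1)
        = segs ++ (((PySem.List.pyRange i (pattern.length : Int) 1).filter (bCondS pattern player)).zip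
                   ((PySem.List.pyRange i (pattern.length : Int) 1).filter (bCondE pattern player))).map
                   (bSeg pattern player) := by
  intro fuel
  induction fuel with
  | zero =>
    intro s hs i hi hdrop _ segs
    have hsnil : s = [] := List.eq_nil_of_length_eq_zero (Nat.le_zero.mp hs)
    subst hsnil
    have hge : (pattern.length : Int) ≤ i := by
      have := List.drop_eq_nil_iff.mp hdrop
      omega
    rw [PySem.List.pyRange_one_eq_nil hge]
    simp [PySem.List.enumerate_nil, aGo]
  | succ fuel ih =>
    intro s hs i hi hdrop hfresh segs
    cases s with
    | nil =>
      have hge : (pattern.length : Int) ≤ i := by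
        have := List.drop_eq_nil_iff.mp hdrop
        omega
      rw [PySem.List.pyRange_one_eq_nil hge]
      simp [PySem.List.enumerate_nil, aGo]
    | cons x xs =>
      have hle' : i.toNat ≤ pattern.length := by
        by_contra hc
        rw [List.drop_eq_nil_of_le (by omega)] at hdrop
        exact List.cons_ne_nil _ _ hdrop.symm
      have h2 : (x :: xs).length = pattern.length - i.toNat := by
        rw [← hdrop, List.length_drop]
      have hlen : i.toNat + (x :: xs).length = pattern.length := by omega
      have hin : i < (pattern.length : Int) := by simp at hlen; omega
      have hget0 : PySem.List.pyGet? pattern i = some x := by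
        have := pyGet_drop pattern (x :: xs) i hi hdrop 0
        simpa using this
      by_cases hxp : x = player
      · -- a maximal player run starts at i
        have hgetp : PySem.List.pyGet? pattern i = some player := by rw [hget0, hxp]
        set t₁ := xs.takeWhile (fun y => y == player) with ht₁
        set t₂ := xs.dropWhile (fun y => y == player) with ht₂
        have hxs : t₁ ++ t₂ = xs := List.takeWhile_append_dropWhile
        have ht₁mem : ∀ y ∈ t₁, y = player := fun y hy => by
          simpa using List.mem_takeWhile_imp hy
        have hlt : t₁.length + t₂.length = xs.length := by rw [← hxs]; simp
        -- values inside the run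
        have hval : ∀ m : Int, i ≤ m → m ≤ i + (t₁.length : Int) →
            PySem.List.pyGet? pattern m = some player := by
          intro m hm1 hm2
          have hmt : m = i + (((m - i).toNat : Nat) : Int) := by omega
          rw [hmt, pyGet_drop pattern (x :: xs) i hi hdrop]
          cases htc : (m - i).toNat with
          | zero => simp [hxp]
          | succ t' =>
            have ht' : t' < t₁.length := by omega
            rw [List.getElem?_cons_succ, ← hxs, List.getElem?_append_left ht',
              List.getElem?_eq_getElem ht']
            exact congrArg some (ht₁mem _ (List.getElem_mem ht'))
        have hlen' : i.toNat + 1 + t₁.length + t₂.length = pattern.length := by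
          simp at hlen; omega
        -- condS is true at i, false strictly inside the run
        have hcondSi : bCondS pattern player i = true := by
          simp only [bCondS, hgetp]
          rcases hfresh with h0 | hne
          · simp [h0]
          · simp [hne]
        have hcondSmid : ∀ m : Int, i + 1 ≤ m → m < i + 1 + (t₁.length : Int) →
            bCondS pattern player m = false := by
          intro m h1 h3
          have : PySem.List.pyGet? pattern (m - 1) = some player :=
            hval (m - 1) (by omega) (by omega)
          simp [bCondS, this, show ¬ (m = 0) by omega]
        -- condE is false in the run except at its end e = i + t₁.length
        have hcondEmid : ∀ m : Int, i ≤ m → m < i + (t₁.length : Int) →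
            bCondE pattern player m = false := by
          intro m h1 h3
          have hv : PySem.List.pyGet? pattern (m + 1) = some player :=
            hval (m + 1) (by omega) (by omega)
          have hmne : ¬ (m = (pattern.length : Int) - 1) := by omega
          simp [bCondE, hv, hmne]
        have hcondEe : bCondE pattern player (i + (t₁.length : Int)) = true := by
          have hv : PySem.List.pyGet? pattern (i + (t₁.length : Int)) = some player :=
            hval _ (by omega) (by omega)
          simp only [bCondE, hv]
          cases ht2c : t₂ with
          | nil =>
            have : i + (t₁.length : Int) = (pattern.length : Int) - 1 := by
              rw [ht2c] at hlen'; simp at hlen'; omega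
            simp [this]
          | cons y t₂' =>
            have hy : (fun y => y == player) y = false :=
              dropWhile_cons_head xs y t₂' (by rw [← ht₂, ht2c])
            have hyv : PySem.List.pyGet? pattern (i + (t₁.length : Int) + 1) = some y := by
              have hc : i + (t₁.length : Int) + 1 = i + ((t₁.length + 1 : Nat) : Int) := by
                push_cast; omega
              rw [hc, pyGet_drop pattern (x :: xs) i hi hdrop]
              rw [List.getElem?_cons_succ, ← hxs, ht2c,
                List.getElem?_append_right (le_refl _)]
              simp
            have hne : ¬ (PySem.List.pyGet? pattern (i + (t₁.length : Int) + 1) = some player) := by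
              rw [hyv]; simp at hy; simp [hy]
            simp [hne]
        -- range splits → the two filters each expose one element of this run
        have hstarts : (PySem.List.pyRange i (pattern.length : Int) 1).filter (bCondS pattern player)
            = i :: (PySem.List.pyRange (i + 1 + (t₁.length : Int)) (pattern.length : Int) 1).filter (bCondS pattern player) := by
          rw [show (PySem.List.pyRange i (pattern.length : Int) 1)
              = PySem.List.pyRange i (i + 1) 1 ++ PySem.List.pyRange (i + 1) (i + 1 + (t₁.length : Int)) 1
                ++ PySem.List.pyRange (i + 1 + (t₁.length : Int)) (pattern.length : Int) 1 from by
            rw [← PySem.List.pyRange_one_append i (i + 1) (i + 1 + (t₁.length : Int)) (by omega) (by omega),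
              ← PySem.List.pyRange_one_append i (i + 1 + (t₁.length : Int)) _ (by omega) (by omega)]]
          rw [List.filter_append, List.filter_append, PySem.List.pyRange_one_singleton,
            filter_pyRange_nil _ _ _ hcondSmid]
          simp [hcondSi]
        have hends : (PySem.List.pyRange i (pattern.length : Int) 1).filter (bCondE pattern player)
            = (i + (t₁.length : Int)) :: (PySem.List.pyRange (i + 1 + (t₁.length : Int)) (pattern.length : Int) 1).filter (bCondE pattern player) := by
          rw [show (PySem.List.pyRange i (pattern.length : Int) 1)
              = PySem.List.pyRange i (i + (t₁.length : Int)) 1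
                ++ PySem.List.pyRange (i + (t₁.length : Int)) (i + (t₁.length : Int) + 1) 1
                ++ PySem.List.pyRange (i + (t₁.length : Int) + 1) (pattern.length : Int) 1 from by
            rw [← PySem.List.pyRange_one_append i (i + (t₁.length : Int)) (i + (t₁.length : Int) + 1) (by omega) (by omega),
              ← PySem.List.pyRange_one_append i (i + (t₁.length : Int) + 1) _ (by omega) (by omega)]]
          rw [List.filter_append, List.filter_append, PySem.List.pyRange_one_singleton,
            filter_pyRange_nil _ _ _ hcondEmid]
          simp [hcondEe, show i + (t₁.length : Int) + 1 = i + 1 + (t₁.length : Int) from by omega]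
        -- A's side: enter the run, consume t₁ with state start = i
        rw [PySem.List.enumerate_cons, ← hxs, PySem.List.enumerate_append]
        simp only [aGo, if_pos hxp, ite_true]
        rw [aGo_run pattern player t₁ ht₁mem (i + 1) i hi]
        rw [hstarts, hends]
        cases ht2c : t₂ with
        | nil =>
          have hnlen : (pattern.length : Int) = i + 1 + (t₁.length : Int) := by
            rw [ht2c] at hlen'; simp at hlen'; omega
          rw [PySem.List.pyRange_one_eq_nil (le_of_eq hnlen)]
          simp only [List.filter_nil, List.zip_cons_cons, List.zip_nil_right,
            List.map_cons, List.map_nil, PySem.List.enumerate_nil]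
          simp only [aGo, if_pos (show i ≠ -1 by omega), bSeg]
          rw [show (pattern.length : Int) - 1 = i + (t₁.length : Int) from by omega]
          simp
        | cons y t₂' =>
          have hy : (fun y => y == player) y = false :=
            dropWhile_cons_head xs y t₂' (by rw [← ht₂, ht2c])
          have hyne : y ≠ player := by simpa using hy
          have hyv : PySem.List.pyGet? pattern (i + 1 + (t₁.length : Int)) = some y := by
            have hc : i + 1 + (t₁.length : Int) = i + ((t₁.length + 1 : Nat) : Int) := by
              push_cast; omega
            rw [hc, pyGet_drop pattern (x :: xs) i hi hdrop]
            rw [List.getElem?_cons_succ, ← hxs, ht2c,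
              List.getElem?_append_right (le_refl _)]
            simp
          rw [PySem.List.enumerate_cons]
          simp only [aGo, if_neg hyne, if_pos (show i ≠ -1 by omega)]
          -- A appended this run's segment; recurse on the rest from position i+2+t₁.length
          have hdrop'' : pattern.drop (i + 1 + (t₁.length : Int) + 1).toNat = t₂' := by
            have hc : (i + 1 + (t₁.length : Int) + 1).toNat = i.toNat + (2 + t₁.length) := by
              omega
            rw [hc, ← List.drop_drop, hdrop]
            show List.drop (2 + t₁.length) (x :: xs) = t₂'
            rw [show 2 + t₁.length = (1 + t₁.length) + 1 from by omega]
            rw [← List.drop_drop]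
            rw [show List.drop (1 + t₁.length) (x :: xs)
                = List.drop t₁.length xs from by
              rw [show 1 + t₁.length = t₁.length + 1 from by omega]; simp]
            rw [← hxs, List.drop_left, ht2c]
            simp
          have hfresh'' : (i + 1 + (t₁.length : Int) + 1 = 0) ∨
              PySem.List.pyGet? pattern (i + 1 + (t₁.length : Int) + 1 - 1) ≠ some player := by
            right
            rw [show i + 1 + (t₁.length : Int) + 1 - 1 = i + 1 + (t₁.length : Int) from by omega,
              hyv]
            simp [hyne]
          have ht2'len : t₂'.length ≤ fuel := by
            rw [ht2c] at hlt; simp at hs hlt; omega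
          rw [ih t₂' ht2'len _ (by omega) hdrop'' hfresh'']
          -- the leading index i+1+t₁.length of the remaining range fails both filters
          have hj : i + 1 + (t₁.length : Int) < (pattern.length : Int) := by
            rw [ht2c] at hlen'; simp at hlen'; omega
          rw [PySem.List.pyRange_one_cons hj,
            List.filter_cons_of_neg (by simp [bCondS, hyv, hyne]),
            List.filter_cons_of_neg (by simp [bCondE, hyv, hyne])]
          simp only [List.zip_cons_cons, List.map_cons, bSeg, List.append_assoc,
            List.singleton_append]
          rw [show i + 1 + (t₁.length : Int) - 1 = i + (t₁.length : Int) from by omega]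
      · -- non-player stone at i: A skips it, both filters reject i
        have hcondS : bCondS pattern player i = false := by
          simp [bCondS, hget0, hxp]
        have hcondE : bCondE pattern player i = false := by
          simp [bCondE, hget0, hxp]
        rw [PySem.List.enumerate_cons]
        simp only [aGo, if_neg hxp, if_neg (by simp : ¬((-1 : Int) ≠ -1))]
        rw [PySem.List.pyRange_one_cons hin, List.filter_cons_of_neg (by simp [hcondS]),
          List.filter_cons_of_neg (by simp [hcondE])]
        have hdrop' : pattern.drop (i + 1).toNat = xs := by
          have : (i + 1).toNat = i.toNat + 1 := by omega
          rw [this, ← List.drop_drop, hdrop]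
          simp
        exact ih xs (by simpa using Nat.lt_succ_iff.mp (lt_of_lt_of_le (by simp) hs)) (i + 1)
          (by omega) hdrop' (Or.inr (by rw [show i + 1 - 1 = i from by omega, hget0]; simp [hxp])) segs

-- ===== VERDICT (by name: the statement is the Claim_ definition above) =====
theorem find_segments_py_spec : Claim_equal_find_segments_py := by
  intro pattern player _
  unfold Spec_find_segments_py find_segments_py find_segments_py_alt
  exact aGo_main pattern player pattern.length pattern (le_refl _) 0 (by omega) (by simp)
    (Or.inl rfl) []
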